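-- pv_equiv track=rewrite | github.com/makssuppras1/DTU_findit_webscraper | pipeline_findit_thesis_meta.py | clean_rows
-- ===== SOURCE A (Python) =====
-- def clean_rows(
--     header: list[str],
--     rows: list[list[str]],
--     drop_empty_rows: bool = True,
--     dedup_by_column: str | None = "ID",
--     strip_strings: bool = True,
-- ) -> list[list[str]]:
--     """Strip cells, drop all-empty rows, optionally deduplicate by key column (keep first)."""
--     if not header:
--         return rows
--     key_idx = header.index(dedup_by_column) if dedup_by_column and dedup_by_column in header else None
--
--     out: list[list[str]] = []
--     seen_keys: set[str] = set()
--     for row in rows: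
--         if len(row) != len(header):
--             # Pad or truncate to header length so we don't break columns
--             row = list(row) + [""] * (len(header) - len(row)) if len(row) < len(header) else row[: len(header)]
--         if strip_strings:
--             row = [str(c).strip() for c in row]
--         if drop_empty_rows and not any(c for c in row):
--             continue
--         if key_idx is not None and key_idx < len(row) and dedup_by_column:
--             key = row[key_idx].strip()
--             if key and key in seen_keys:
--                 continue
--             if key:
--                 seen_keys.add(key)
--         out.append(row)
--     return out
-- ===== SOURCE B (Python) =====
-- def clean_rows(
--     header: list[str],
--     rows: list[list[str]],
--     drop_empty_rows: bool = True,
--     dedup_by_column: str | None = "ID",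
--     strip_strings: bool = True,
-- ) -> list[list[str]]:
--     """Index-driven rebuild of each row, then an index-map dedup: the first-occurrence
--     position of every key is computed up front (reverse-overwrite dict), and rows are
--     kept by comparing their position against that map instead of streaming a seen-set."""
--     if not header:
--         return rows
--     n = len(header)
--     key_idx = header.index(dedup_by_column) if dedup_by_column and dedup_by_column in header else None
--
--     def rebuild(row):
--         # build the n cells by position: in-range cells (optionally stripped), '' beyond
--         return [
--             (row[i].strip() if strip_strings else row[i]) if i < len(row) else ""
--             for i in range(n)
--         ]
--
--     survivors = [
--         fixed
--         for fixed in map(rebuild, rows)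
--         if not (drop_empty_rows and not any(fixed))
--     ]
--     if key_idx is None:
--         return survivors
--
--     first: dict[str, int] = {}
--     for i, row in reversed(list(enumerate(survivors))):
--         first[row[key_idx].strip()] = i
--     return [
--         row
--         for i, row in enumerate(survivors)
--         if row[key_idx].strip() == "" or first[row[key_idx].strip()] == i
--     ]
-- ===== Notes on version B (the rewrite author's own statement) =====
-- stated objective: alternative
-- what changed: Rows are rebuilt cell-by-cell by indexing over range(len(header)) instead of pad/truncate list surgery, and the streaming seen-set dedup is replaced by a first-occurrence index map built once by reverse-overwrite dict assignment and consulted positionally (keep row i iff its key is empty or first[key]==i), in staged passes instead of one fused stateful loop.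
import Mathlib
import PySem

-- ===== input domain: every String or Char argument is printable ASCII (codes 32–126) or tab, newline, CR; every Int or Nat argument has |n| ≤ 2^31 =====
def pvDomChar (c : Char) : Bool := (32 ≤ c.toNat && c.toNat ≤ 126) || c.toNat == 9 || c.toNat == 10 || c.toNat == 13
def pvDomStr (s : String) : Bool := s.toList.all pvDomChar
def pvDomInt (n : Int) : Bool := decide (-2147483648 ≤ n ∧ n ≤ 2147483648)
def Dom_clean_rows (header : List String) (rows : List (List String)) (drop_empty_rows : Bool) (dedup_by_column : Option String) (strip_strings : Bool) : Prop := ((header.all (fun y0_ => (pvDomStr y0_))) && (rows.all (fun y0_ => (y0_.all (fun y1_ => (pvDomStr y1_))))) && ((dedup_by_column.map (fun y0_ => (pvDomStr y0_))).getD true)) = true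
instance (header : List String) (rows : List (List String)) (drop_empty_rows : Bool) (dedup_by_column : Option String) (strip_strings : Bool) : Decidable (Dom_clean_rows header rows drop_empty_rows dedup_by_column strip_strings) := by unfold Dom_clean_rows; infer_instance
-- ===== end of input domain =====

-- B rebuilds each output row cell-by-cell over range(len(header)) and replaces A's streaming seen-set dedup with a
-- first-occurrence index map (built once by reverse-overwrite) consulted by position; same cost, a different mechanism.
-- Return value only (A does not mutate its arguments).

-- ===== PORT A =====
def clean_rows (header : List String) (rows : List (List String)) (drop_empty_rows : Bool) (dedup_by_column : Option String) (strip_strings : Bool) : List (List String) :=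
  if header = [] then rows else
  let key_idx : Option Nat :=
    match dedup_by_column with
    | some s => if s ≠ "" ∧ s ∈ header then PySem.List.index? header s else none
    | none => none
  (rows.foldl (fun (st : List (List String) × PySem.Set String) row =>
    let row := if row.length ≠ header.length then
        (if row.length < header.length then row ++ List.replicate (header.length - row.length) ""
         else row.take header.length)  -- row[:len(header)] (nonnegative bound = take)
      else row
    let row := if strip_strings then row.map PySem.Str.strip else row
    if drop_empty_rows && !(row.any (fun c => decide (c ≠ ""))) then st
    else
      match key_idx with
      | some k =>
          if k < row.length ∧ dedup_by_column.getD "" ≠ "" then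
            let key := PySem.Str.strip (row.getD k "")  -- row[key_idx]: in range under the guard
            if key ≠ "" ∧ st.2.contains key then st
            else (st.1 ++ [row], if key ≠ "" then PySem.Set.add st.2 key else st.2)
          else (st.1 ++ [row], st.2)
      | none => (st.1 ++ [row], st.2)) ([], PySem.Set.empty)).1

-- ===== PORT B =====
-- Source B's inner helper `rebuild`: build the n cells by position, '' beyond the source row's length
def pvRebuild (n : Nat) (ss : Bool) (row : List String) : List String :=
  (List.range n).map (fun i =>
    if i < row.length then (if ss then PySem.Str.strip (row.getD i "") else row.getD i "") else "")

def clean_rows_alt (header : List String) (rows : List (List String)) (drop_empty_rows : Bool) (dedup_by_column : Option String) (strip_strings : Bool) : List (List String) :=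
  if header = [] then rows else
  let n := header.length
  let key_idx : Option Nat :=
    match dedup_by_column with
    | some s => if s ≠ "" ∧ s ∈ header then PySem.List.index? header s else none
    | none => none
  let survivors := (rows.map (pvRebuild n strip_strings)).filter
    (fun fixed => !(drop_empty_rows && !(fixed.any (fun c => decide (c ≠ "")))))
  match key_idx with
  | none => survivors
  | some k =>
    -- first[key] = i for reversed(enumerate(survivors)): reverse-overwrite leaves the FIRST index per key
    let first := ((PySem.List.enumerate survivors 0).reverse).foldl
      (fun (d : PySem.Dict String Int) p => d.insert (PySem.Str.strip (p.2.getD k "")) p.1) PySem.Dict.empty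
    ((PySem.List.enumerate survivors 0).filter
      (fun p => PySem.Str.strip (p.2.getD k "") == "" || (first.get? (PySem.Str.strip (p.2.getD k "")) == some p.1))).map Prod.snd

-- ===== PRECONDITION & SPEC =====
def Spec_clean_rows (header : List String) (rows : List (List String)) (drop_empty_rows : Bool) (dedup_by_column : Option String) (strip_strings : Bool) (out : List (List String)) : Prop := out = clean_rows_alt header rows drop_empty_rows dedup_by_column strip_strings
instance (header : List String) (rows : List (List String)) (drop_empty_rows : Bool) (dedup_by_column : Option String) (strip_strings : Bool) (out : List (List String)) : Decidable (Spec_clean_rows header rows drop_empty_rows dedup_by_column strip_strings out) := by unfold Spec_clean_rows; infer_instance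

-- ===== CLAIM (what is proved, stated in full; the proofs are below) =====
def Claim_equal_clean_rows : Prop := ∀ (header : List String) (rows : List (List String)) (drop_empty_rows : Bool) (dedup_by_column : Option String) (strip_strings : Bool), Dom_clean_rows header rows drop_empty_rows dedup_by_column strip_strings → Spec_clean_rows header rows drop_empty_rows dedup_by_column strip_strings (clean_rows header rows drop_empty_rows dedup_by_column strip_strings)

-- ===== LEMMAS AND PROOFS =====

-- the stripped key of a (normalized) row
def pvKey (k : Nat) (r : List String) : String := PySem.Str.strip (r.getD k "")

-- A's pad-and-truncate, as one formula
def pvNorm (n : Nat) (row : List String) : List String :=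
  row.take n ++ List.replicate (n - row.length) ""

-- A's per-row preprocessing (normalize then optionally strip), as a function
def pvG (n : Nat) (ss : Bool) (row : List String) : List String :=
  if ss then (pvNorm n row).map PySem.Str.strip else pvNorm n row

-- the part of A's loop body after preprocessing
def pvCore (key_idx : Option Nat) (drop : Bool) (dname : String)
    (st : List (List String) × PySem.Set String) (row : List String) :
    List (List String) × PySem.Set String :=
  if drop && !(row.any (fun c => decide (c ≠ ""))) then st
  else
    match key_idx with
    | some k =>
        if k < row.length ∧ dname ≠ "" then
          let key := PySem.Str.strip (row.getD k "")
          if key ≠ "" ∧ st.2.contains key then st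
          else (st.1 ++ [row], if key ≠ "" then PySem.Set.add st.2 key else st.2)
        else (st.1 ++ [row], st.2)
    | none => (st.1 ++ [row], st.2)

-- A's dedup step with the in-range and nonempty-name guards already discharged
def pvDA (k : Nat) (st : List (List String) × PySem.Set String) (row : List String) :
    List (List String) × PySem.Set String :=
  let key := PySem.Str.strip (row.getD k "")
  if key ≠ "" ∧ st.2.contains key then st
  else (st.1 ++ [row], if key ≠ "" then PySem.Set.add st.2 key else st.2)

theorem pvDA_def (k : Nat) (st : List (List String) × PySem.Set String) (r : List String) :
    pvDA k st r = (if PySem.Str.strip (r.getD k "") ≠ "" ∧ st.2.contains (PySem.Str.strip (r.getD k "")) then st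
      else (st.1 ++ [r], if PySem.Str.strip (r.getD k "") ≠ "" then PySem.Set.add st.2 (PySem.Str.strip (r.getD k "")) else st.2)) := rfl

-- B's first-occurrence index map
def pvFirstD (k : Nat) (full : List (List String)) : PySem.Dict String Int :=
  ((PySem.List.enumerate full 0).reverse).foldl
    (fun (d : PySem.Dict String Int) p => d.insert (pvKey k p.2) p.1) PySem.Dict.empty

theorem pvNorm_eq (n : Nat) (row : List String) :
    (if row.length ≠ n then
        (if row.length < n then row ++ List.replicate (n - row.length) "" else row.take n)
      else row) = pvNorm n row := by
  unfold pvNorm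
  split_ifs with h1 h2
  · rw [List.take_of_length_le (by omega)]
  · have : n - row.length = 0 := by omega
    simp [this]
  · have h : row.length = n := by omega
    rw [List.take_of_length_le (by omega)]
    simp [h]

theorem pvG_length (n : Nat) (ss : Bool) (row : List String) : (pvG n ss row).length = n := by
  unfold pvG pvNorm
  split_ifs <;> simp <;> omega

theorem pvNorm_getElem (n : Nat) (row : List String) (i : Nat) (hn : i < n)
    (h : i < (pvNorm n row).length) :
    (pvNorm n row)[i] = if i < row.length then row.getD i "" else "" := by
  unfold pvNorm
  by_cases hl : i < row.length
  · rw [if_pos hl]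
    rw [List.getElem_append_left (by simp [List.length_take]; omega)]
    rw [List.getElem_take]
    exact (List.getD_eq_getElem row "" hl).symm
  · rw [if_neg hl]
    have hlen : (List.take n row).length = row.length := by simp [List.length_take]; omega
    rw [List.getElem_append_right (by omega)]
    simp

-- B's index-driven rebuild computes exactly A's normalize-then-strip
theorem pvRebuild_eq (n : Nat) (ss : Bool) (row : List String) :
    pvRebuild n ss row = pvG n ss row := by
  apply List.ext_getElem
  · simp [pvRebuild, pvG_length]
  · intro i h1 h2
    have hn : i < n := by simpa [pvRebuild] using h1
    simp only [pvRebuild, List.getElem_map, List.getElem_range]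
    unfold pvG
    cases ss with
    | false =>
        simp only [Bool.false_eq_true, if_false]
        rw [pvNorm_getElem n row i hn]
    | true =>
        simp only [if_true, List.getElem_map]
        rw [pvNorm_getElem n row i hn]
        by_cases hl : i < row.length
        · simp [hl]
        · simp [hl]
          decide

-- the drop-empty skip inside pvCore is B's filter stage
theorem pvFilterStep (key_idx : Option Nat) (drop : Bool) (dname : String)
    (l : List (List String)) :
    l.foldl (pvCore key_idx drop dname) ([], PySem.Set.empty)
    = (l.filter (fun row => !(drop && !(row.any (fun c => decide (c ≠ "")))))).foldl
        (pvCore key_idx false dname) ([], PySem.Set.empty) := by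
  cases drop with
  | false => simp
  | true =>

    have hpred : (fun (row : List String) => !(true && !(row.any (fun c => decide (c ≠ "")))))
        = (fun row => row.any (fun c => decide (c ≠ ""))) := by
      funext row; simp
    rw [hpred, ← PySem.List.foldl_if_eq_foldl_filter]
    apply PySem.List.foldl_congr_mem
    intro acc x _
    by_cases h : x.any (fun c => decide (c ≠ "")) = true
    · rw [if_pos h]
      unfold pvCore
      rw [h]
      simp
    · rw [if_neg h]
      rw [Bool.not_eq_true] at h
      unfold pvCore
      rw [h]
      simp

-- A's loop is a fold of pvCore over the preprocessed rows
theorem pvStep1 (n : Nat) (key_idx : Option Nat) (drop ss : Bool) (dname : String)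
    (rows : List (List String)) :
    rows.foldl (fun (st : List (List String) × PySem.Set String) row =>
      let row := if row.length ≠ n then
          (if row.length < n then row ++ List.replicate (n - row.length) "" else row.take n)
        else row
      let row := if ss then row.map PySem.Str.strip else row
      if drop && !(row.any (fun c => decide (c ≠ ""))) then st
      else
        match key_idx with
        | some k =>
            if k < row.length ∧ dname ≠ "" then
              let key := PySem.Str.strip (row.getD k "")
              if key ≠ "" ∧ st.2.contains key then st
              else (st.1 ++ [row], if key ≠ "" then PySem.Set.add st.2 key else st.2)
            else (st.1 ++ [row], st.2)
        | none => (st.1 ++ [row], st.2)) ([], PySem.Set.empty)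
      = (rows.map (pvG n ss)).foldl (pvCore key_idx drop dname) ([], PySem.Set.empty) := by
  rw [List.foldl_map]
  apply PySem.List.foldl_congr_mem
  intro acc x _
  simp only [pvG, pvNorm_eq, pvCore]

-- the reverse-overwrite dict looks up the FIRST matching index
theorem pvFirst_get? (k : Nat) (ps : List (Int × List String)) (key : String) :
    ((ps.reverse).foldl (fun (d : PySem.Dict String Int) p => d.insert (pvKey k p.2) p.1)
        PySem.Dict.empty).get? key
    = (ps.find? (fun p => pvKey k p.2 == key)).map Prod.fst := by
  rw [List.foldl_reverse]
  induction ps with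
  | nil => rfl
  | cons q ps ih =>
    rw [List.foldr_cons, PySem.Dict.get?_insert]
    by_cases h : key = pvKey k q.2
    · rw [if_pos h, List.find?_cons_of_pos (p := fun p => pvKey k p.2 == key) (a := q)
        (l := ps) (by simp [h])]
      rfl
    · rw [if_neg h, List.find?_cons_of_neg (p := fun p => pvKey k p.2 == key) (a := q)
        (l := ps) (by simp; exact fun hh => h hh.symm)]
      exact ih

-- find? over an enumeration is findIdx? shifted by the start
theorem pvFind_enum (k : Nat) (key : String) :
    ∀ (l : List (List String)) (s : Int),
    ((PySem.List.enumerate l s).find? (fun p => pvKey k p.2 == key)).map Prod.fst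
    = Option.map (fun (j : Nat) => s + (j : Int)) (l.findIdx? (fun r => pvKey k r == key)) := by
  intro l
  induction l with
  | nil => intro s; simp [PySem.List.enumerate_nil]
  | cons r t ih =>
    intro s
    rw [PySem.List.enumerate_cons, List.findIdx?_cons]
    by_cases h : (pvKey k r == key) = true
    · rw [List.find?_cons_of_pos (p := fun p => pvKey k p.2 == key) (a := ((s, r) : Int × List String))
        (l := PySem.List.enumerate t (s + 1)) (by simpa using h), if_pos h]
      simp
    · rw [List.find?_cons_of_neg (p := fun p => pvKey k p.2 == key) (a := ((s, r) : Int × List String))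
        (l := PySem.List.enumerate t (s + 1)) (by simpa using h), if_neg h, ih (s + 1)]
      cases t.findIdx? (fun r => pvKey k r == key) with
      | none => simp
      | some j =>
          simp only [Option.map_some, Option.some.injEq]
          push_cast
          ring

-- the index map returns exactly `off` iff no earlier row carries the same key
theorem pvGetFirst (k : Nat) (full : List (List String)) (off : Nat) (hoff : off < full.length)
    (key : String) (hkey : pvKey k full[off] = key) :
    ((pvFirstD k full).get? key = some (off : Int)
      ↔ ∀ j (_ : j < full.length) (_ : j < off), pvKey k (full.getD j []) ≠ key) := by
  rw [pvFirstD, pvFirst_get?, pvFind_enum]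
  obtain ⟨j, hfi⟩ : ∃ j, full.findIdx? (fun r => pvKey k r == key) = some j := by
    cases h : full.findIdx? (fun r => pvKey k r == key) with
    | some j => exact ⟨j, rfl⟩
    | none =>
        exfalso
        have hall := List.findIdx?_eq_none_iff.mp h
        have := hall full[off] (List.getElem_mem hoff)
        simp [hkey] at this
  obtain ⟨hjlen, pj, hmin⟩ := List.findIdx?_eq_some_iff_getElem.mp hfi
  have pj' : pvKey k full[j] = key := by simpa using pj
  rw [hfi]
  simp only [Option.map_some, Option.some.injEq]
  constructor
  · intro h i hi hio
    have hj : j = off := by omega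
    have := hmin i (by omega)
    rw [List.getD_eq_getElem _ _ hi]
    simpa using this
  · intro hnone
    have hj : j = off := by
      rcases Nat.lt_trichotomy j off with h | h | h
      · exfalso
        have := hnone j hjlen h
        rw [List.getD_eq_getElem _ _ hjlen] at this
        exact this pj'
      · exact h
      · exact absurd (show (pvKey k full[off] == key) = true by simp [hkey]) (hmin off h)
    subst hj
    omega

-- the streaming seen-set dedup equals B's filter-by-first-index, by suffix induction
theorem pvDedupAux (k : Nat) (full : List (List String)) :
    ∀ (t : List (List String)) (off : Nat) (S : PySem.Set String) (acc : List (List String)),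
    full.drop off = t →
    (∀ key, key ≠ "" → (S.contains key = true ↔
        ∃ j, j < full.length ∧ j < off ∧ pvKey k (full.getD j []) = key)) →
    (t.foldl (pvDA k) (acc, S)).1
    = acc ++ ((PySem.List.enumerate t (off : Int)).filter
        (fun p => pvKey k p.2 == "" || ((pvFirstD k full).get? (pvKey k p.2) == some p.1))).map
        Prod.snd := by
  intro t
  induction t with
  | nil => intro off S acc _ _; simp [PySem.List.enumerate_nil]
  | cons r t' ih =>
    intro off S acc hdrop hinv
    have hoff : off < full.length := by
      by_contra h
      rw [List.drop_eq_nil_iff.mpr (by omega)] at hdrop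
      simp at hdrop
    have hget : full[off] = r := by
      have h0 : (full.drop off)[0]'(by rw [hdrop]; simp) = r := by
        simp [hdrop]
      rw [List.getElem_drop] at h0
      simpa using h0
    have hdrop' : full.drop (off + 1) = t' := by
      have h1 : (full.drop off).drop 1 = t' := by rw [hdrop]; rfl
      rwa [List.drop_drop] at h1
    rw [List.foldl_cons, PySem.List.enumerate_cons]
    simp only [List.filter_cons]
    by_cases hkey : pvKey k r = ""
    · -- empty key: both keep the row, A's seen set unchanged
      have hA : pvDA k (acc, S) r = (acc ++ [r], S) := by
        have h' : PySem.Str.strip (r.getD k "") = "" := hkey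
        rw [pvDA_def, if_neg (fun h => h.1 h'), if_neg (fun h => h h')]
      have hinv' : ∀ key, key ≠ "" → (S.contains key = true ↔
          ∃ j, j < full.length ∧ j < off + 1 ∧ pvKey k (full.getD j []) = key) := by
        intro key hk
        rw [hinv key hk]
        constructor
        · rintro ⟨j, hj1, hj2, hj3⟩; exact ⟨j, hj1, by omega, hj3⟩
        · rintro ⟨j, hj1, hj2, hj3⟩
          refine ⟨j, hj1, ?_, hj3⟩
          rcases Nat.lt_succ_iff_lt_or_eq.mp hj2 with h | h
          · exact h
          · subst h
            rw [List.getD_eq_getElem _ _ hj1, hget] at hj3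
            exact absurd (hj3.symm.trans hkey) hk
      rw [if_pos (show (pvKey k r == "" ||
          ((pvFirstD k full).get? (pvKey k r) == some ((off : Nat) : Int))) = true by simp [hkey])]
      rw [hA, ih (off + 1) S (acc ++ [r]) hdrop' hinv']
      simp [Nat.cast_add, Nat.cast_one]
    · -- nonempty key
      have hfirst := pvGetFirst k full off hoff (pvKey k r) (by rw [hget])
      by_cases hc : S.contains (pvKey k r) = true
      · -- duplicate: A skips, B filters it out
        have hA : pvDA k (acc, S) r = (acc, S) := by
          have h' : PySem.Str.strip (r.getD k "") ≠ "" := hkey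
          have hc2 : S.contains (PySem.Str.strip (r.getD k "")) = true := hc
          rw [pvDA_def, if_pos ⟨h', hc2⟩]
        have hne : ¬ ((pvFirstD k full).get? (pvKey k r) = some (off : Int)) := by
          intro h
          obtain ⟨j, hj1, hj2, hj3⟩ := (hinv _ hkey).mp hc
          exact hfirst.mp h j hj1 hj2 hj3
        have hinv' : ∀ key, key ≠ "" → (S.contains key = true ↔
            ∃ j, j < full.length ∧ j < off + 1 ∧ pvKey k (full.getD j []) = key) := by
          intro key hk
          rw [hinv key hk]
          constructor
          · rintro ⟨j, hj1, hj2, hj3⟩; exact ⟨j, hj1, by omega, hj3⟩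
          · rintro ⟨j, hj1, hj2, hj3⟩
            rcases Nat.lt_succ_iff_lt_or_eq.mp hj2 with h | h
            · exact ⟨j, hj1, h, hj3⟩
            · subst h
              rw [List.getD_eq_getElem _ _ hj1, hget] at hj3
              subst hj3
              exact (hinv _ hkey).mp hc
        have h1 : (pvKey k r == "") = false := by simp [hkey]
        have h2 : ((pvFirstD k full).get? (pvKey k r) == some ((off : Nat) : Int)) = false := by
          simpa using hne
        rw [if_neg (show ¬ ((pvKey k r == "" ||
            ((pvFirstD k full).get? (pvKey k r) == some ((off : Nat) : Int))) = true) by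
          simp [h1, h2])]
        rw [hA, ih (off + 1) S acc hdrop' hinv']
        simp [Nat.cast_add, Nat.cast_one]
      · -- first occurrence: both keep, A records the key
        have hA : pvDA k (acc, S) r = (acc ++ [r], PySem.Set.add S (pvKey k r)) := by
          have h' : PySem.Str.strip (r.getD k "") ≠ "" := hkey
          have hc' : ¬ S.contains (PySem.Str.strip (r.getD k "")) = true := hc
          rw [pvDA_def, if_neg (fun h => hc' h.2), if_pos h']
          rfl
        have heq : (pvFirstD k full).get? (pvKey k r) = some (off : Int) := by
          rw [hfirst]
          intro j hj1 hj2 hj3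
          exact hc ((hinv _ hkey).mpr ⟨j, hj1, hj2, hj3⟩)
        have hinv' : ∀ key, key ≠ "" → ((PySem.Set.add S (pvKey k r)).contains key = true ↔
            ∃ j, j < full.length ∧ j < off + 1 ∧ pvKey k (full.getD j []) = key) := by
          intro key hk
          constructor
          · intro hck
            have hmem : key ∈ PySem.Set.add S (pvKey k r) :=
              (PySem.Set.contains_iff _ _).mp hck
            rcases (PySem.Set.mem_add S (pvKey k r) key).mp hmem with h | h
            · obtain ⟨j, hj1, hj2, hj3⟩ := (hinv key hk).mp ((PySem.Set.contains_iff _ _).mpr h)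
              exact ⟨j, hj1, by omega, hj3⟩
            · subst h
              exact ⟨off, hoff, by omega, by rw [List.getD_eq_getElem _ _ hoff, hget]⟩
          · rintro ⟨j, hj1, hj2, hj3⟩
            apply (PySem.Set.contains_iff _ _).mpr
            apply (PySem.Set.mem_add S (pvKey k r) key).mpr
            rcases Nat.lt_succ_iff_lt_or_eq.mp hj2 with h | h
            · exact Or.inl ((PySem.Set.contains_iff _ _).mp ((hinv key hk).mpr ⟨j, hj1, h, hj3⟩))
            · subst h
              rw [List.getD_eq_getElem _ _ hj1, hget] at hj3
              exact Or.inr hj3.symm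
        rw [if_pos (show (pvKey k r == "" ||
            ((pvFirstD k full).get? (pvKey k r) == some ((off : Nat) : Int))) = true by
          simp [heq])]
        rw [hA, ih (off + 1) (PySem.Set.add S (pvKey k r)) (acc ++ [r]) hdrop' hinv']
        simp [Nat.cast_add, Nat.cast_one]

-- the two sides of the equivalence, over abstract parameters (proof-only helpers)
def pvA (n : Nat) (key_idx : Option Nat) (drop ss : Bool) (dname : String)
    (rows : List (List String)) : List (List String) :=
  (rows.foldl (fun (st : List (List String) × PySem.Set String) row =>
    let row := if row.length ≠ n then
        (if row.length < n then row ++ List.replicate (n - row.length) "" else row.take n)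
      else row
    let row := if ss then row.map PySem.Str.strip else row
    if drop && !(row.any (fun c => decide (c ≠ ""))) then st
    else
      match key_idx with
      | some k =>
          if k < row.length ∧ dname ≠ "" then
            let key := PySem.Str.strip (row.getD k "")
            if key ≠ "" ∧ st.2.contains key then st
            else (st.1 ++ [row], if key ≠ "" then PySem.Set.add st.2 key else st.2)
          else (st.1 ++ [row], st.2)
      | none => (st.1 ++ [row], st.2)) ([], PySem.Set.empty)).1

def pvB (n : Nat) (key_idx : Option Nat) (drop ss : Bool) (rows : List (List String)) :
    List (List String) :=
  let survivors := (rows.map (pvRebuild n ss)).filter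
    (fun fixed => !(drop && !(fixed.any (fun c => decide (c ≠ "")))))
  match key_idx with
  | none => survivors
  | some k =>
    let first := ((PySem.List.enumerate survivors 0).reverse).foldl
      (fun (d : PySem.Dict String Int) p => d.insert (PySem.Str.strip (p.2.getD k "")) p.1) PySem.Dict.empty
    ((PySem.List.enumerate survivors 0).filter
      (fun p => PySem.Str.strip (p.2.getD k "") == "" || (first.get? (PySem.Str.strip (p.2.getD k "")) == some p.1))).map Prod.snd

-- the main loop-vs-index-map equivalence
theorem pvMain (n : Nat) (key_idx : Option Nat) (drop ss : Bool) (dname : String)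
    (rows : List (List String))
    (hk : ∀ k, key_idx = some k → k < n ∧ dname ≠ "") :
    pvA n key_idx drop ss dname rows = pvB n key_idx drop ss rows := by
  unfold pvA pvB
  rw [pvStep1 n key_idx drop ss dname rows]
  rw [show rows.map (pvG n ss) = rows.map (pvRebuild n ss) from
    List.map_congr_left (fun r _ => (pvRebuild_eq n ss r).symm)]
  rw [pvFilterStep]
  set survivors : List (List String) :=
    (rows.map (pvRebuild n ss)).filter
      (fun fixed => !(drop && !(fixed.any (fun c => decide (c ≠ ""))))) with hs
  have hlen : ∀ r ∈ survivors, r.length = n := by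
    intro r hr
    rw [hs] at hr
    have hr2 : r ∈ rows.map (pvRebuild n ss) := List.mem_of_mem_filter hr
    obtain ⟨row, _, rfl⟩ := List.mem_map.mp hr2
    rw [pvRebuild_eq]
    exact pvG_length n ss row
  cases key_idx with
  | none =>
      have hstep : survivors.foldl (pvCore none false dname) ([], PySem.Set.empty)
          = survivors.foldl (fun (s : List (List String) × PySem.Set String) e => (s.1 ++ [e], s.2))
              ([], PySem.Set.empty) :=
        PySem.List.foldl_congr_mem _ _ _ _ (fun acc x _ => rfl)
      rw [hstep, PySem.List.foldl_prod_mk (f := fun acc e => acc ++ [e]) (g := fun acc _ => acc)]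
      rw [show ((survivors.foldl (fun acc e => acc ++ [e]) ([] : List (List String)),
            survivors.foldl (fun acc (_ : List String) => acc) PySem.Set.empty)).1
          = survivors.foldl (fun acc e => acc ++ [e]) ([] : List (List String)) from rfl]
      rw [PySem.List.foldl_append_singleton_eq_self]
      rfl
  | some k =>
      obtain ⟨hkn, hdn⟩ := hk k rfl
      have hcongr : survivors.foldl (pvCore (some k) false dname) ([], PySem.Set.empty)
          = survivors.foldl (pvDA k) ([], PySem.Set.empty) := by
        apply PySem.List.foldl_congr_mem'
        intro x hx acc
        simp only [pvCore, Bool.false_and, Bool.false_eq_true, if_false]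
        rw [if_pos ⟨by rw [hlen x hx]; exact hkn, hdn⟩]
        rfl
      rw [hcongr]
      rw [pvDedupAux k survivors survivors 0 PySem.Set.empty [] (by simp) ?_]
      · simp only [List.nil_append]
        rfl
      · intro key _
        constructor
        · intro h
          exact absurd ((PySem.Set.contains_iff _ _).mp h) (by simp [PySem.Set.empty])
        · rintro ⟨j, _, hj, _⟩
          omega

-- ===== VERDICT (by name: the statement is the Claim_ definition above) =====
theorem clean_rows_spec : Claim_equal_clean_rows := by
  intro header rows drop dedup ss hdom
  clear hdom
  unfold Spec_clean_rows clean_rows clean_rows_alt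
  by_cases hh : header = []
  · simp [hh]
  · simp only [if_neg hh]
    exact pvMain header.length
      (match dedup with
       | some s => if s ≠ "" ∧ s ∈ header then PySem.List.index? header s else none
       | none => none) drop ss (dedup.getD "") rows (by
      intro k hk
      cases dedup with
      | none => simp at hk
      | some s =>
        simp only [Option.getD_some]
        change (if s ≠ "" ∧ s ∈ header then PySem.List.index? header s else none) = some k at hk
        by_cases hcond : s ≠ "" ∧ s ∈ header
        · rw [if_pos hcond] at hk
          obtain ⟨hlt, _, _⟩ := PySem.List.getElem_of_index?_eq_some hk
          exact ⟨hlt, hcond.1⟩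
        · rw [if_neg hcond] at hk; simp at hk)
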